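-- pv_equiv track=rewrite | github.com/aslupin/cpe31-task | week8/needle_the_perfectionist.py | pef
-- ===== SOURCE A (Python) =====
-- def getF(txt):
--     hmap={}
--     for i in txt:
--         if(i in hmap):
--             hmap[i] += 1
--         else:hmap[i] = 1
--     return hmap
--
-- def travel_F(F):
--     ch_promotion = True;can = F[0]
--     for i in F:
--         if(i != can):return False
--     return True
--
-- def pef(txt):
--     for i in range(-1,len(txt)):
--         if(i==-1):txt_tmp = txt
--         else:txt_tmp = txt[:i] + txt[i+1:]
--         hach={};F=[]
--         hach = getF(sorted(list(txt_tmp)))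
--         F = list(hach.values())
--         if(travel_F(F)):return True
--     return False
-- ===== SOURCE B (Python) =====
-- def pef(txt):
--     cnt = {}
--     for ch in txt:
--         cnt[ch] = cnt.get(ch, 0) + 1
--
--     def uniform(vs):
--         return len(set(vs)) <= 1
--
--     if uniform(cnt.values()):
--         return True
--     for ch in cnt:
--         reduced = [n - 1 if c == ch else n for c, n in cnt.items()]
--         if uniform([v for v in reduced if v != 0]):
--             return True
--     return False
-- ===== Notes on version B (the rewrite author's own statement) =====
-- stated objective: faster
-- what changed: A rebuilds, sorts and re-counts the whole string for every deletion position (O(n^2 log n)); B counts frequencies once and tests only each distinct character's count decremented by one (O(n + k^2) for k distinct characters).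
import Mathlib
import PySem

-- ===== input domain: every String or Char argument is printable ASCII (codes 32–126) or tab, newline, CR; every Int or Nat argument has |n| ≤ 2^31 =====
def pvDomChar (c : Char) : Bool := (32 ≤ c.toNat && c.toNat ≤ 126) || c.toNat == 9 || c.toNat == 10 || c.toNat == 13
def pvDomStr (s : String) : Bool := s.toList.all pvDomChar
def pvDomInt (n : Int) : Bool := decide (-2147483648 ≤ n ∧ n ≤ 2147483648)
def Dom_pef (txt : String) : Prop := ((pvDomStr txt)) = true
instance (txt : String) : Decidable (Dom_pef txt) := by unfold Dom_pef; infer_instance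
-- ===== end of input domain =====

-- B counts frequencies once and tests each distinct character's decremented count, instead of
-- A's rebuild-sort-recount per deletion position (objective: faster, asymptotic).


-- ===== PORT A =====
-- getF: frequency dict built with 'if i in hmap: hmap[i] += 1 else: hmap[i] = 1'
def getF (l : List Char) : PySem.Dict Char Int :=
  l.foldl (fun d c => if d.contains c then d.modify c 0 (· + 1) else d.insert c 1) PySem.Dict.empty

-- travel_F: can = F[0] (IndexError on empty F → none branch, excluded by Pre_), then all-equal scan
def travelF (F : List Int) : Bool :=
  match PySem.List.pyGet? F 0 with
  | none => false   -- Python raises IndexError here; unreachable under Pre_pef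
  | some can => F.all (fun i => i == can)

-- the body of A's 'for i in range(-1, len(txt))' loop with early return True
def pefLoop (s : List Char) : List Int → Bool
  | [] => false
  | i :: rest =>
    let tmp := if i == -1 then s
               else PySem.List.slice s none (some i) ++ PySem.List.slice s (some (i + 1)) none
    if travelF (PySem.Dict.values (getF (PySem.List.sorted tmp (fun x => x) false))) then true
    else pefLoop s rest

def pef (txt : String) : Bool :=
  pefLoop txt.toList (PySem.List.pyRange (-1) (txt.toList.length : Int) 1)

-- ===== PORT B =====
-- uniform(vs) = len(set(vs)) <= 1
def uniformB (vs : List Int) : Bool := decide (PySem.Set.len (PySem.Set.ofList vs) ≤ 1)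

def pef_alt (txt : String) : Bool :=
  let cnt := txt.toList.foldl (fun d c => d.insert c (d.getD c 0 + 1)) PySem.Dict.empty
  if uniformB cnt.values then true
  else cnt.keys.any (fun ch =>
    uniformB (((cnt.items.map (fun p => if p.1 == ch then p.2 - 1 else p.2)).filter
      (fun v => !(v == 0)))))

-- ===== PRECONDITION & SPEC =====
-- Pre_ excludes only the empty string, on which A raises IndexError (travel_F reads F[0] of an
-- empty value list); B returns True there.
def Pre_pef (txt : String) : Prop := txt.toList ≠ []
instance (txt : String) : Decidable (Pre_pef txt) := by unfold Pre_pef; infer_instance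
def pvWitness_pef : String := "aab"

def Spec_pef (txt : String) (out : Bool) : Prop := out = pef_alt txt
instance (txt : String) (out : Bool) : Decidable (Spec_pef txt out) := by unfold Spec_pef; infer_instance

-- ===== CLAIM (what is proved, stated in full; the proofs are below) =====
def Claim_equal_pef : Prop := ∀ (txt : String), Dom_pef txt → Pre_pef txt → Spec_pef txt (pef txt)

-- ===== LEMMAS AND PROOFS =====

-- step: the two branches of getF's fold are one modify
lemma getF_step (d : PySem.Dict Char Int) (c : Char) :
    (if d.contains c then d.modify c 0 (· + 1) else d.insert c 1) = d.modify c 0 (· + 1) := by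
  by_cases h : d.contains c = true
  · simp [h]
  · simp only [Bool.not_eq_true] at h
    simp [h, PySem.Dict.modify, PySem.Dict.insert]
    have hn : d.get? c = none := by
      rw [PySem.Dict.get?_eq_none_iff_contains]; simp [h]
    simp [PySem.Dict.getD, hn]

lemma getF_eq_counter (l : List Char) : getF l = PySem.Dict.counter l := by
  unfold getF
  rw [PySem.Dict.counter_eq_foldl]
  congr 1
  funext d c
  exact getF_step d c

lemma travelF_iff (F : List Int) :
    travelF F = true ↔ F ≠ [] ∧ ∀ x ∈ F, ∀ y ∈ F, x = y := by
  unfold travelF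
  cases F with
  | nil => simp [PySem.List.pyGet?]
  | cons a t =>
    have hg : PySem.List.pyGet? (a :: t) (0 : Int) = some a := by
      simp [PySem.List.pyGet?, PySem.List.pyIdx?]
    rw [hg]
    simp only [List.all_eq_true, beq_iff_eq]
    constructor
    · intro h
      refine ⟨by simp, ?_⟩
      intro x hx y hy
      rw [h x hx, h y hy]
    · intro ⟨_, h⟩ x hx
      exact h x hx a (List.mem_cons_self)

lemma uniformB_iff (vs : List Int) :
    uniformB vs = true ↔ ∀ x ∈ vs, ∀ y ∈ vs, x = y := by
  unfold uniformB
  rw [decide_eq_true_iff]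
  have hmem : ∀ x, x ∈ PySem.Set.ofList vs ↔ x ∈ vs := fun x => PySem.Set.mem_ofList vs x
  have hnd : (PySem.Set.ofList vs).Nodup := PySem.Set.nodup_ofList vs
  unfold PySem.Set.len
  constructor
  · intro h x hx y hy
    cases hs : PySem.Set.ofList vs with
    | nil => exact absurd ((hmem x).mpr hx) (by simp [hs])
    | cons a t =>
      have : t = [] := by
        rw [hs] at h; simp at h; omega
      subst this
      have h1 := (hmem x).mpr hx
      have h2 := (hmem y).mpr hy
      rw [hs] at h1 h2; simp at h1 h2; rw [h1, h2]
  · intro h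
    cases hs : PySem.Set.ofList vs with
    | nil => simp
    | cons a t =>
      cases t with
      | nil => simp
      | cons b u =>
        exfalso
        have ha : a ∈ vs := (hmem a).mp (by simp [hs])
        have hb : b ∈ vs := (hmem b).mp (by simp [hs])
        have : a = b := h a ha b hb
        rw [hs] at hnd
        simp [this] at hnd

def check0 (m : List Char) : Bool :=
  travelF (PySem.Dict.values (getF (PySem.List.sorted m (fun x => x) false)))

lemma pefLoop_eq_any (s : List Char) (is : List Int) :
    pefLoop s is = is.any (fun i =>
      check0 (if i == -1 then s
              else PySem.List.slice s none (some i) ++ PySem.List.slice s (some (i + 1)) none)) := by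
  induction is with
  | nil => rfl
  | cons i rest ih =>
    show (if check0 _ = true then true else pefLoop s rest) = _
    rw [List.any_cons, ← ih]
    by_cases h : check0 (if i == -1 then s
        else PySem.List.slice s none (some i) ++ PySem.List.slice s (some (i + 1)) none) = true
    · rw [if_pos h, h, Bool.true_or]
    · rw [if_neg h, Bool.not_eq_true] at *
      rw [h, Bool.false_or]

def Uni (m : List Char) : Prop := ∀ c ∈ m, ∀ d ∈ m, m.count c = m.count d

def Red (l : List Char) (ch c : Char) : Int :=
  if c == ch then (l.count c : Int) - 1 else (l.count c : Int)

def Good (l : List Char) (ch : Char) : Prop :=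
  ∀ c ∈ l, ∀ d ∈ l, Red l ch c ≠ 0 → Red l ch d ≠ 0 → Red l ch c = Red l ch d

lemma values_counter_map (xs : List Char) :
    (PySem.Dict.counter xs).values
      = (PySem.Set.ofList xs).map (fun k => (xs.count k : Int)) := by
  simp only [PySem.Dict.values, PySem.Dict.items_counter, List.map_map]
  rfl

lemma check0_iff (m : List Char) :
    check0 m = true ↔ m ≠ [] ∧ Uni m := by
  unfold check0
  rw [getF_eq_counter, travelF_iff, values_counter_map]
  have hp : (PySem.List.sorted m (fun x => x) false).Perm m := PySem.List.sorted_perm m _ _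
  have hc : ∀ k, (PySem.List.sorted m (fun x => x) false).count k = m.count k :=
    fun k => hp.count_eq k
  have hm : ∀ k, k ∈ PySem.Set.ofList (PySem.List.sorted m (fun x => x) false) ↔ k ∈ m := by
    intro k
    rw [PySem.Set.mem_ofList]
    exact hp.mem_iff
  constructor
  · rintro ⟨hne, hall⟩
    constructor
    · intro hm0
      apply hne
      subst hm0
      simp [PySem.List.sorted]
    · intro c hcm d hdm
      have hx := hall ((m.count c : Int)) ?_ ((m.count d : Int)) ?_
      · exact_mod_cast hx
      · exact List.mem_map.mpr ⟨c, (hm c).mpr hcm, by rw [hc]⟩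
      · exact List.mem_map.mpr ⟨d, (hm d).mpr hdm, by rw [hc]⟩
  · rintro ⟨hne, huni⟩
    constructor
    · rcases List.exists_mem_of_ne_nil m hne with ⟨a, ha⟩
      have : a ∈ PySem.Set.ofList (PySem.List.sorted m (fun x => x) false) := (hm a).mpr ha
      exact fun he => by simp [List.map_eq_nil_iff] at he; rw [he] at this; simp at this
    · intro x hx y hy
      rcases List.mem_map.mp hx with ⟨c, hcs, rfl⟩
      rcases List.mem_map.mp hy with ⟨d, hds, rfl⟩
      rw [hc, hc]
      exact_mod_cast huni c ((hm c).mp hcs) d ((hm d).mp hds)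

lemma count_eraseIdx_int (l : List Char) (i : Nat) (hi : i < l.length) (c : Char) :
    ((l.eraseIdx i).count c : Int) = Red l (l[i]) c := by
  have hsplit : l = l.take i ++ l[i] :: l.drop (i + 1) := by
    conv_lhs => rw [← List.take_append_drop i l]
    rw [List.drop_eq_getElem_cons hi]
  have he : l.eraseIdx i = l.take i ++ l.drop (i + 1) := List.eraseIdx_eq_take_drop_succ l i
  have hcl : l.count c = (l.take i).count c + (if c = l[i] then 1 else 0) + (l.drop (i + 1)).count c := by
    conv_lhs => rw [hsplit]
    rw [List.count_append, List.count_cons]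
    simp only [beq_iff_eq]
    by_cases hch : c = l[i]
    · rw [if_pos hch.symm, if_pos hch]; omega
    · rw [if_neg (fun hh => hch hh.symm), if_neg hch]; omega
  rw [he, List.count_append, Red]
  by_cases hch : c = l[i]
  · rw [if_pos hch] at hcl
    rw [if_pos (by simp [hch] : (c == l[i]) = true)]
    push_cast
    omega
  · rw [if_neg hch] at hcl
    rw [if_neg (by simp [hch] : ¬ (c == l[i]) = true)]
    push_cast
    omega

lemma uni_eraseIdx_iff_good (l : List Char) (i : Nat) (hi : i < l.length) :
    Uni (l.eraseIdx i) ↔ Good l (l[i]) := by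
  have hcount := count_eraseIdx_int l i hi
  constructor
  · intro hu c hc d hd hrc hrd
    rw [← hcount c, ← hcount d]
    have hcm : c ∈ l.eraseIdx i := by
      rw [← List.count_pos_iff]
      have := hcount c
      omega
    have hdm : d ∈ l.eraseIdx i := by
      rw [← List.count_pos_iff]
      have := hcount d
      omega
    exact_mod_cast hu c hcm d hdm
  · intro hg c hc d hd
    have hcl : c ∈ l := (l.eraseIdx_sublist i).mem hc
    have hdl : d ∈ l := (l.eraseIdx_sublist i).mem hd
    have hrc : Red l (l[i]) c ≠ 0 := by
      rw [← hcount c]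
      have : 0 < (l.eraseIdx i).count c := List.count_pos_iff.mpr hc
      omega
    have hrd : Red l (l[i]) d ≠ 0 := by
      rw [← hcount d]
      have : 0 < (l.eraseIdx i).count d := List.count_pos_iff.mpr hd
      omega
    have := hg c hcl d hdl hrc hrd
    rw [← hcount c, ← hcount d] at this
    exact_mod_cast this

lemma pef_iff (txt : String) (hnil : txt.toList ≠ []) :
    pef txt = true ↔
      Uni txt.toList ∨ ∃ i : Nat, ∃ h : i < txt.toList.length,
        (txt.toList.eraseIdx i ≠ [] ∧ Good txt.toList (txt.toList[i])) := by
  unfold pef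
  rw [pefLoop_eq_any, List.any_eq_true]
  constructor
  · rintro ⟨j, hjmem, hj⟩
    have hjr := (PySem.List.mem_pyRange_one).mp hjmem
    by_cases hneg : j = -1
    · left
      subst hneg
      simp only [beq_self_eq_true, if_true] at hj
      exact ((check0_iff _).mp hj).2
    · right
      have h0 : 0 ≤ j := by omega
      have hjlt : j.toNat < txt.toList.length := by omega
      refine ⟨j.toNat, hjlt, ?_⟩
      rw [show (j == -1) = false from by simp [hneg], if_neg (by simp)] at hj
      rw [show j = ((j.toNat : Nat) : Int) from (Int.toNat_of_nonneg h0).symm] at hj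
      rw [show ((j.toNat : Int) + 1) = (((j.toNat + 1 : Nat) : Int)) from by push_cast; ring] at hj
      rw [PySem.List.slice_to_natCast, PySem.List.slice_from_natCast] at hj
      rw [← List.eraseIdx_eq_take_drop_succ] at hj
      have := (check0_iff _).mp hj
      exact ⟨this.1, (uni_eraseIdx_iff_good _ _ hjlt).mp this.2⟩
  · rintro (huni | ⟨i, hlt, hne, hg⟩)
    · refine ⟨-1, (PySem.List.mem_pyRange_one).mpr (by
        have : 0 < txt.toList.length := List.length_pos_iff.mpr hnil
        omega), ?_⟩
      simp only [beq_self_eq_true, if_true]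
      exact (check0_iff _).mpr ⟨hnil, huni⟩
    · refine ⟨(i : Int), (PySem.List.mem_pyRange_one).mpr (by omega), ?_⟩
      rw [show ((i : Int) == -1) = false from by simp, if_neg (by simp)]
      rw [show ((i : Int) + 1) = (((i + 1 : Nat) : Int)) from by push_cast; ring]
      rw [PySem.List.slice_to_natCast, PySem.List.slice_from_natCast]
      rw [← List.eraseIdx_eq_take_drop_succ]
      exact (check0_iff _).mpr ⟨hne, (uni_eraseIdx_iff_good _ _ hlt).mpr hg⟩
lemma uniform_values_iff (xs : List Char) :
    uniformB ((PySem.Dict.counter xs).values) = true ↔ Uni xs := by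
  rw [values_counter_map, uniformB_iff]
  constructor
  · intro h c hc d hd
    have := h (xs.count c : Int)
      (List.mem_map.mpr ⟨c, (PySem.Set.mem_ofList xs c).mpr hc, rfl⟩)
      (xs.count d : Int)
      (List.mem_map.mpr ⟨d, (PySem.Set.mem_ofList xs d).mpr hd, rfl⟩)
    exact_mod_cast this
  · intro h x hx y hy
    rcases List.mem_map.mp hx with ⟨c, hcs, rfl⟩
    rcases List.mem_map.mp hy with ⟨d, hds, rfl⟩
    exact_mod_cast h c ((PySem.Set.mem_ofList xs c).mp hcs) d ((PySem.Set.mem_ofList xs d).mp hds)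

lemma uniform_reduced_iff (xs : List Char) (ch : Char) :
    uniformB (((PySem.Dict.counter xs).items.map
        (fun p => if p.1 == ch then p.2 - 1 else p.2)).filter (fun v => !(v == 0))) = true
      ↔ Good xs ch := by
  have hmap : (PySem.Dict.counter xs).items.map (fun p => if p.1 == ch then p.2 - 1 else p.2)
      = (PySem.Set.ofList xs).map (Red xs ch) := by
    rw [PySem.Dict.items_counter, List.map_map]
    rfl
  rw [hmap, uniformB_iff]
  have hmem : ∀ x, (x ∈ ((PySem.Set.ofList xs).map (Red xs ch)).filter (fun v => !(v == 0)))
      ↔ ∃ c ∈ xs, Red xs ch c = x ∧ x ≠ 0 := by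
    intro x
    rw [List.mem_filter]
    simp only [List.mem_map, Bool.not_eq_eq_eq_not, Bool.not_true, beq_eq_false_iff_ne, ne_eq]
    constructor
    · rintro ⟨⟨c, hcs, rfl⟩, hne⟩
      exact ⟨c, (PySem.Set.mem_ofList xs c).mp hcs, rfl, hne⟩
    · rintro ⟨c, hc, rfl, hne⟩
      exact ⟨⟨c, (PySem.Set.mem_ofList xs c).mpr hc, rfl⟩, hne⟩
  constructor
  · intro h c hc d hd hrc hrd
    exact h _ ((hmem _).mpr ⟨c, hc, rfl, hrc⟩) _ ((hmem _).mpr ⟨d, hd, rfl, hrd⟩)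
  · intro h x hx y hy
    rcases (hmem x).mp hx with ⟨c, hc, rfl, hxne⟩
    rcases (hmem y).mp hy with ⟨d, hd, rfl, hyne⟩
    exact h c hc d hd hxne hyne

lemma pef_alt_iff (txt : String) :
    pef_alt txt = true ↔ Uni txt.toList ∨ ∃ ch ∈ txt.toList, Good txt.toList ch := by
  unfold pef_alt
  rw [show txt.toList.foldl (fun d c => d.insert c (d.getD c 0 + 1)) PySem.Dict.empty
      = PySem.Dict.counter txt.toList from PySem.Dict.foldl_insert_getD_add_one_eq_counter txt.toList]
  show (if uniformB ((PySem.Dict.counter txt.toList).values) = true then true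
      else (PySem.Dict.counter txt.toList).keys.any fun ch =>
        uniformB (((PySem.Dict.counter txt.toList).items.map
          (fun p => if p.1 == ch then p.2 - 1 else p.2)).filter (fun v => !(v == 0)))) = true ↔ _
  by_cases h1 : uniformB ((PySem.Dict.counter txt.toList).values) = true
  · simp only [h1, if_true, true_iff]
    exact Or.inl ((uniform_values_iff txt.toList).mp h1)
  · rw [Bool.not_eq_true] at h1
    rw [h1, if_neg (by simp : ¬ (false = true)), List.any_eq_true]
    constructor
    · rintro ⟨ch, hchk, hch⟩
      right
      refine ⟨ch, (PySem.Set.mem_ofList txt.toList ch).mp (by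
        rw [← PySem.Dict.keys_counter]; exact hchk), ?_⟩
      exact (uniform_reduced_iff txt.toList ch).mp hch
    · rintro (hu | ⟨ch, hch, hg⟩)
      · exact absurd ((uniform_values_iff txt.toList).mpr hu) (by rw [h1]; simp)
      · refine ⟨ch, ?_, (uniform_reduced_iff txt.toList ch).mpr hg⟩
        rw [PySem.Dict.keys_counter]
        exact (PySem.Set.mem_ofList txt.toList ch).mpr hch

lemma pef_eq_pef_alt (txt : String) (hnil : txt.toList ≠ []) : pef txt = pef_alt txt := by
  rw [Bool.eq_iff_iff, pef_iff txt hnil, pef_alt_iff txt]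
  constructor
  · rintro (hu | ⟨i, hlt, _, hg⟩)
    · exact Or.inl hu
    · exact Or.inr ⟨_, List.getElem_mem hlt, hg⟩
  · rintro (hu | ⟨ch, hch, hg⟩)
    · exact Or.inl hu
    · rcases List.mem_iff_getElem.mp hch with ⟨i, hlt, rfl⟩
      by_cases h2 : 2 ≤ txt.toList.length
      · refine Or.inr ⟨i, hlt, ?_, hg⟩
        intro he
        have hlen := congrArg List.length he
        rw [List.length_eraseIdx, if_pos hlt, List.length_nil] at hlen
        omega
      · left
        have h1 : txt.toList.length = 1 := by
          have : 0 < txt.toList.length := List.length_pos_iff.mpr hnil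
          omega
        rcases List.length_eq_one_iff.mp h1 with ⟨a, ha⟩
        intro c hc d hd
        rw [ha] at hc hd
        simp at hc hd
        rw [hc, hd]

-- ===== VERDICT (by name: the statement is the Claim_ definition above) =====
theorem pef_spec : Claim_equal_pef := by
  intro txt _ hpre
  unfold Spec_pef
  exact pef_eq_pef_alt txt hpre
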